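-- pv_equiv track=rewrite | github.com/FireShade3DS/whitvm | src/whitvm/minifier.py | _apply_string_map
-- ===== SOURCE A (Python) =====
-- from typing import Union, Dict, Any
--
-- def _apply_string_map(line: str, string_map: Dict[str, str]) -> str:
--     """Replace repeated strings with variable references"""
--     if not string_map:
--         return line
--
--     result = []
--     i = 0
--
--     while i < len(line):
--         if line[i] == '#':
--             end = line.find('#', i + 1)
--             if end != -1:
--                 string_val = line[i:end+1]
--                 if string_val in string_map:
--                     result.append(f'*{string_map[string_val]}*')
--                 else:
--                     result.append(string_val)
--                 i = end + 1
--             else: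
--                 result.append(line[i])
--                 i += 1
--         else:
--             result.append(line[i])
--             i += 1
--
--     return ''.join(result)
-- ===== SOURCE B (Python) =====
-- def _apply_string_map(line: str, string_map: dict) -> str:
--     """Replace repeated strings with variable references"""
--     if not string_map:
--         return line
--     pieces = []
--     rest = line
--     while True:
--         pre, sep, rest = rest.partition('#')
--         pieces.append(pre)
--         if not sep:
--             break
--         mid, sep2, rest = rest.partition('#')
--         if not sep2:
--             pieces.append('#' + mid)
--             break
--         tok = '#' + mid + '#'
--         pieces.append('*' + string_map[tok] + '*' if tok in string_map else tok)
--     return ''.join(pieces)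
-- ===== Notes on version B (the rewrite author's own statement) =====
-- stated objective: faster
-- what changed: Replaces the per-character index walk with str.find scans by chunk-wise consumption via str.partition: each loop turn takes the whole prefix up to the next '#' and the '#...#' token in one step, appending a few chunks per token instead of one list element per character.
import Mathlib
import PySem

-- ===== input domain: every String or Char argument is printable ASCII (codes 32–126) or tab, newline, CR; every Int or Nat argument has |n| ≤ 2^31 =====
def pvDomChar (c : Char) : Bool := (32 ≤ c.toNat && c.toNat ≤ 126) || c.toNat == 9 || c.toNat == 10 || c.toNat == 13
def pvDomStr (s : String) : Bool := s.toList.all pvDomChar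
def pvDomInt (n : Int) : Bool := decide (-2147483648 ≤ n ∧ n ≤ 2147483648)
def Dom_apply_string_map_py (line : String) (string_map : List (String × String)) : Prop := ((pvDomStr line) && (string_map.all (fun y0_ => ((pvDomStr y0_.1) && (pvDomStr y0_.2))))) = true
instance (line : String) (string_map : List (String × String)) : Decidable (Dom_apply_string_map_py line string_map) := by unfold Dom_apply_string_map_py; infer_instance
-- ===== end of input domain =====

-- B replaces A's per-character index walk (with str.find for the closing '#') by chunk-wise
-- consumption of the line via str.partition; same return value (objective: faster, measured).

-- ===== PORT A =====
-- the str-keyed dict as a char-list association list (first match = Python dict lookup)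
def pvToCharsMap (string_map : List (String × String)) : List (List Char × List Char) :=
  string_map.map (fun p => (p.1.toList, p.2.toList))

-- f'*{string_map[s]}*' if s in string_map else s   (this expression appears in both Pythons)
def pvMapTok (m : List (List Char × List Char)) (tok : List Char) : List Char :=
  match List.lookup tok m with
  | some v => '*' :: (v ++ ['*'])
  | none => tok

-- termination fact for A's while loop: a successful find from i+1 lands at an index ≥ i+1
theorem pvFindFrom_ge (cs : List Char) (i : Nat) (h : i + 1 ≤ cs.length)
    (he : PySem.Chars.findFrom cs ['#'] ((i+1 : Nat) : Int) none ≠ -1) :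
    ((i+1 : Nat) : Int) ≤ PySem.Chars.findFrom cs ['#'] ((i+1 : Nat) : Int) none :=
  (PySem.Chars.findFrom_natCast_spec cs ['#'] (i+1) h he).1

-- A's while loop: state (result, i)
def pvGoA (m : List (List Char × List Char)) (cs : List Char)
    (result : List (List Char)) (i : Nat) : List (List Char) :=
  if h : i < cs.length then
    if cs[i] = '#' then
      let e := PySem.Chars.findFrom cs ['#'] ((i+1 : Nat) : Int) none
      if he : e ≠ -1 then
        pvGoA m cs
          (result ++ [pvMapTok m (PySem.Chars.slice cs (some (i : Int)) (some (e+1)))])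
          (e.toNat + 1)
      else
        pvGoA m cs (result ++ [[cs[i]]]) (i+1)
    else
      pvGoA m cs (result ++ [[cs[i]]]) (i+1)
  else result
termination_by cs.length - i
decreasing_by
  · have := pvFindFrom_ge cs i (by omega) he
    omega
  · omega
  · omega

def apply_string_map_py (line : String) (string_map : List (String × String)) : String :=
  if string_map.isEmpty then line
  else String.ofList (PySem.Chars.join [] (pvGoA (pvToCharsMap string_map) line.toList [] 0))

-- ===== PORT B =====
-- termination fact for B's while loop: partition strictly shrinks the remainder
theorem pvDropWhile_len (p : Char → Bool) (l : List Char) (d : Char) (r : List Char)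
    (h : List.dropWhile p l = d :: r) : r.length < l.length := by
  have := (List.dropWhile_suffix (l := l) p).length_le
  rw [h] at this; simp at this; omega

-- B's while loop: state (pieces, rest); rest.partition('#') is ported by hand as
-- takeWhile/dropWhile at the first '#' (exact for this single-character separator)
def pvGoB (m : List (List Char × List Char)) (pieces : List (List Char))
    (rest : List Char) : List (List Char) :=
  let pre := rest.takeWhile (· != '#')
  match hd : rest.dropWhile (· != '#') with
  | [] => pieces ++ [pre]
  | _ :: r1 =>
    let mid := r1.takeWhile (· != '#')
    match hd2 : r1.dropWhile (· != '#') with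
    | [] => pieces ++ [pre, '#' :: mid]
    | _ :: r2 => pvGoB m (pieces ++ [pre, pvMapTok m ('#' :: (mid ++ ['#']))]) r2
termination_by rest.length
decreasing_by
  have h1 := pvDropWhile_len _ _ _ _ hd
  have h2 := pvDropWhile_len _ _ _ _ hd2
  omega

def apply_string_map_py_alt (line : String) (string_map : List (String × String)) : String :=
  if string_map.isEmpty then line
  else String.ofList (PySem.Chars.join [] (pvGoB (pvToCharsMap string_map) [] line.toList))

-- ===== PRECONDITION & SPEC =====
def Spec_apply_string_map_py (line : String) (string_map : List (String × String)) (out : String) : Prop := out = apply_string_map_py_alt line string_map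
instance (line : String) (string_map : List (String × String)) (out : String) : Decidable (Spec_apply_string_map_py line string_map out) := by unfold Spec_apply_string_map_py; infer_instance

-- ===== CLAIM (what is proved, stated in full; the proofs are below) =====
def Claim_equal_apply_string_map_py : Prop := ∀ (line : String) (string_map : List (String × String)), Dom_apply_string_map_py line string_map → Spec_apply_string_map_py line string_map (apply_string_map_py line string_map)

-- ===== LEMMAS AND PROOFS =====

theorem pvJoin_nil (ps : List (List Char)) : PySem.Chars.join [] ps = ps.flatten := by
  induction ps with
  | nil => simp [PySem.Chars.join, List.intercalate]
  | cons a t ih =>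
      cases t with
      | nil => simp [PySem.Chars.join, List.intercalate]
      | cons b u =>
          simp only [PySem.Chars.join, List.intercalate] at ih ⊢
          simp [List.intersperse, List.flatten_cons] at ih ⊢
          simpa using ih

theorem pvSingleton_prefix (a : Char) (l : List Char) : [a] <+: l ↔ l.head? = some a := by
  cases l <;> simp [List.prefix_cons_iff, eq_comm]

theorem pvSingleton_infix (a : Char) (l : List Char) : [a] <:+: l ↔ a ∈ l := by
  constructor
  · intro h; exact h.sublist.subset (by simp)
  · intro h
    obtain ⟨s, u, rfl⟩ := List.append_of_mem h
    exact ⟨s, u, by simp⟩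

theorem pvDropWhile_cons_eq (p : Char → Bool) (t : List Char) (d : Char) (r : List Char)
    (h : List.dropWhile p t = d :: r) : p d = false := by
  induction t with
  | nil => simp at h
  | cons a t ih =>
      rw [List.dropWhile_cons] at h
      by_cases hpa : p a = true
      · rw [if_pos hpa] at h; exact ih h
      · rw [if_neg hpa] at h
        injection h with h1 _
        subst h1
        simpa using hpa

theorem pvDropWhile_hash (t : List Char) (h : '#' ∈ t) :
    t.dropWhile (· != '#') = '#' :: (t.dropWhile (· != '#')).tail := by
  have hne : t.dropWhile (· != '#') ≠ [] := by
    rw [Ne, List.dropWhile_eq_nil_iff]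
    intro hall
    have := hall '#' h
    simp at this
  obtain ⟨d, r, hd⟩ := List.exists_cons_of_ne_nil hne
  have hdf := pvDropWhile_cons_eq _ _ _ _ hd
  simp at hdf
  rw [hd, hdf]
  simp

theorem pvFind_hash (t : List Char) (h : '#' ∈ t) :
    PySem.Chars.find t ['#'] = ((t.takeWhile (· != '#')).length : Int) := by
  have hinf : ['#'] <:+: t := (pvSingleton_infix '#' t).2 h
  have h0 : 0 ≤ PySem.Chars.find t ['#'] := (PySem.Chars.find_nonneg_iff t ['#']).2 hinf
  obtain ⟨hpre, hmin⟩ := PySem.Chars.find_spec h0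
  set m0 := (t.takeWhile (· != '#')).length with hm0def
  -- positions before m0 are not '#'
  have hj : ∀ j, j < m0 → t[j]? ≠ some '#' := by
    intro j hjm
    have hjtw : j < (t.takeWhile (· != '#')).length := hjm
    have hjlen : j < t.length :=
      lt_of_lt_of_le hjm (by simpa [hm0def] using (List.takeWhile_prefix (l := t) (· != '#')).length_le)
    have hget : (t.takeWhile (· != '#'))[j] = t[j] := (List.takeWhile_prefix (· != '#')).getElem hjtw
    have hmem : (t.takeWhile (· != '#'))[j] ∈ t.takeWhile (· != '#') := List.getElem_mem _
    have hpred := List.mem_takeWhile_imp hmem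
    rw [List.getElem?_eq_getElem hjlen]
    intro hcontr
    rw [← hget] at hcontr
    simp at hcontr
    simp [hcontr] at hpred
  -- position m0 is '#'
  have hdw := pvDropWhile_hash t h
  have hm0 : t[m0]? = some '#' := by
    conv_lhs => rw [← List.takeWhile_append_dropWhile (p := (· != '#')) (l := t)]
    rw [List.getElem?_append_right (by simp [hm0def])]
    rw [hdw]
    simp [hm0def]
  -- compare find with m0
  have hfpre : t[(PySem.Chars.find t ['#']).toNat]? = some '#' := by
    have := (pvSingleton_prefix '#' (t.drop (PySem.Chars.find t ['#']).toNat)).1 hpre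
    rwa [List.head?_drop] at this
  rcases lt_trichotomy (PySem.Chars.find t ['#']).toNat m0 with hlt | heq | hgt
  · exact absurd hfpre (hj _ hlt)
  · omega
  · exfalso
    exact hmin m0 hgt ((pvSingleton_prefix '#' (t.drop m0)).2 (by rwa [List.head?_drop]))

-- B's loop is accumulator-independent
theorem pvGoB_acc (m : List (List Char × List Char)) :
    ∀ (n : Nat) (rest : List Char), rest.length ≤ n → ∀ (pieces : List (List Char)),
      pvGoB m pieces rest = pieces ++ pvGoB m [] rest := by
  intro n
  induction n with
  | zero =>
      intro rest hn pieces
      have : rest = [] := by cases rest <;> simp_all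
      subst this
      rw [pvGoB.eq_def, pvGoB.eq_def]
      simp
  | succ n ih =>
      intro rest hn pieces
      rw [pvGoB.eq_def, pvGoB.eq_def]
      simp only []
      split
      · simp
      · rename_i d r1 hd
        split
        · simp
        · rename_i d2 r2 hd2
          have h1 := pvDropWhile_len _ _ _ _ hd
          have h2 := pvDropWhile_len _ _ _ _ hd2
          conv_lhs => rw [ih r2 (by omega)]
          conv_rhs => rw [ih r2 (by omega)]
          simp

theorem pvGoB_acc' (m : List (List Char × List Char)) (rest : List Char) (pieces : List (List Char)) :
    pvGoB m pieces rest = pieces ++ pvGoB m [] rest :=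
  pvGoB_acc m rest.length rest le_rfl pieces

-- one step of B's loop, accumulator discharged
theorem pvGoB_step (m : List (List Char × List Char)) (rest : List Char) :
    pvGoB m [] rest =
      rest.takeWhile (· != '#') ::
        (match rest.dropWhile (· != '#') with
         | [] => []
         | _ :: r1 =>
           match r1.dropWhile (· != '#') with
           | [] => ['#' :: r1.takeWhile (· != '#')]
           | _ :: r2 => pvMapTok m ('#' :: (r1.takeWhile (· != '#') ++ ['#'])) :: pvGoB m [] r2) := by
  conv_lhs => rw [pvGoB.eq_def]
  simp only []
  split
  · rename_i hd; rw [hd]; simp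
  · rename_i d r1 hd
    rw [hd]
    simp only []
    split
    · rename_i hd2; rw [hd2]; simp
    · rename_i d2 r2 hd2
      rw [hd2, pvGoB_acc']
      simp

-- chunk lemmas about B's flattened output
theorem pvB_nil (m : List (List Char × List Char)) : (pvGoB m [] []).flatten = [] := by
  rw [pvGoB_step]; simp

theorem pvB_no_hash (m : List (List Char × List Char)) (t : List Char) (h : '#' ∉ t) :
    (pvGoB m [] t).flatten = t := by
  have hd : t.dropWhile (· != '#') = [] := by
    rw [List.dropWhile_eq_nil_iff]
    intro x hx
    simp
    intro hxe; exact h (hxe ▸ hx)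
  have htw : t.takeWhile (· != '#') = t := by
    rw [List.takeWhile_eq_self_iff]
    intro x hx
    simp
    intro hxe; exact h (hxe ▸ hx)
  rw [pvGoB_step, hd]
  simp [htw]

theorem pvB_cons_ne (m : List (List Char × List Char)) (c : Char) (t : List Char) (hc : c ≠ '#') :
    (pvGoB m [] (c :: t)).flatten = c :: (pvGoB m [] t).flatten := by
  rw [pvGoB_step, pvGoB_step (rest := t)]
  rw [List.takeWhile_cons, List.dropWhile_cons]
  simp [hc]

theorem pvB_hash_no (m : List (List Char × List Char)) (t : List Char) (h : '#' ∉ t) :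
    (pvGoB m [] ('#' :: t)).flatten = '#' :: t := by
  have hd : t.dropWhile (· != '#') = [] := by
    rw [List.dropWhile_eq_nil_iff]
    intro x hx
    simp
    intro hxe; exact h (hxe ▸ hx)
  have htw : t.takeWhile (· != '#') = t := by
    rw [List.takeWhile_eq_self_iff]
    intro x hx
    simp
    intro hxe; exact h (hxe ▸ hx)
  rw [pvGoB_step]
  rw [List.takeWhile_cons, List.dropWhile_cons]
  simp [hd, htw]

theorem pvB_hash_yes (m : List (List Char × List Char)) (t : List Char) (h : '#' ∈ t) :
    (pvGoB m [] ('#' :: t)).flatten =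
      pvMapTok m ('#' :: (t.takeWhile (· != '#') ++ ['#'])) ++
        (pvGoB m [] (t.dropWhile (· != '#')).tail).flatten := by
  have hdw := pvDropWhile_hash t h
  rw [pvGoB_step]
  rw [List.takeWhile_cons, List.dropWhile_cons]
  simp only [bne_self_eq_false, Bool.false_eq_true, ite_false]
  rw [hdw]
  simp

-- A's loop computes B's flattened output on the remaining suffix
theorem pvGoA_eq (m : List (List Char × List Char)) (cs : List Char) :
    ∀ (n i : Nat) (result : List (List Char)), cs.length - i ≤ n → i ≤ cs.length →
      (pvGoA m cs result i).flatten = result.flatten ++ (pvGoB m [] (cs.drop i)).flatten := by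
  intro n
  induction n with
  | zero =>
      intro i result hn hi
      have hieq : i = cs.length := by omega
      rw [pvGoA.eq_def]
      simp [hieq, pvB_nil]
  | succ n ih =>
      intro i result hn hi
      rw [pvGoA.eq_def]
      by_cases h : i < cs.length
      · simp only [h, dite_true]
        have hdropi : cs.drop i = cs[i] :: cs.drop (i+1) := List.drop_eq_getElem_cons h
        by_cases hc : cs[i] = '#'
        · simp only [hc, if_true]
          set t := cs.drop (i+1) with ht
          by_cases he : PySem.Chars.findFrom cs ['#'] ((i+1 : Nat) : Int) none ≠ -1
          · -- a closing '#' exists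
            have hmem : '#' ∈ t := by
              by_contra hmemn
              have hfind : PySem.Chars.find t ['#'] = -1 := by
                rw [PySem.Chars.find_eq_neg_one_iff]
                rw [pvSingleton_infix]
                exact hmemn
              rw [PySem.Chars.findFrom_natCast cs ['#'] (i+1) (by omega)] at he
              rw [← ht] at he
              simp [hfind] at he
            have hfind : PySem.Chars.find t ['#'] = ((t.takeWhile (· != '#')).length : Int) :=
              pvFind_hash t hmem
            set m0 := (t.takeWhile (· != '#')).length with hm0
            have hE : PySem.Chars.findFrom cs ['#'] ((i+1 : Nat) : Int) none = ((i+1+m0 : Nat) : Int) := by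
              rw [PySem.Chars.findFrom_natCast cs ['#'] (i+1) (by omega), ← ht, hfind]
              rw [if_neg (by omega)]
              push_cast
              ring
            have hdw := pvDropWhile_hash t hmem
            have htlen : m0 < t.length := by
              conv_rhs => rw [← List.takeWhile_append_dropWhile (p := (· != '#')) (l := t)]
              rw [hdw]
              simp [hm0]
            have htfull : t.length = cs.length - (i+1) := by simp [ht]
            -- the slice is the '#…#' token
            have hslice : PySem.Chars.slice cs (some (i : Int))
                (some (PySem.Chars.findFrom cs ['#'] ((i+1 : Nat) : Int) none + 1)) =
                '#' :: (t.takeWhile (· != '#') ++ ['#']) := by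
              rw [hE]
              have h1 : ((i+1+m0 : Nat) : Int) + 1 = ((i+m0+2 : Nat) : Int) := by push_cast; ring
              rw [h1, PySem.Chars.slice_eq_listSlice, PySem.List.slice_natCast]
              have h2 : i + m0 + 2 - i = m0 + 2 := by omega
              rw [h2, hdropi, hc]
              rw [List.take_succ_cons]
              congr 1
              have htwlen : (t.takeWhile (· != '#')).length = m0 := hm0.symm
              conv_lhs => rw [← List.takeWhile_append_dropWhile (p := (· != '#')) (l := t), hdw]
              rw [List.take_append]
              rw [List.take_of_length_le (by rw [htwlen]; omega)]
              rw [htwlen]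
              simp
            -- the jump target
            have htoNat : (PySem.Chars.findFrom cs ['#'] ((i+1 : Nat) : Int) none).toNat + 1 = i + m0 + 2 := by
              rw [hE]; simp; omega
            have hdropnext : cs.drop (i + m0 + 2) = (t.dropWhile (· != '#')).tail := by
              have hstep : cs.drop (i + m0 + 2) = t.drop (m0 + 1) := by
                rw [ht, List.drop_drop]
                congr 1
                omega
              rw [hstep]
              have htwlen : (t.takeWhile (· != '#')).length = m0 := hm0.symm
              conv_lhs => rw [← List.takeWhile_append_dropWhile (p := (· != '#')) (l := t), hdw]
              rw [List.drop_append]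
              rw [List.drop_eq_nil_of_le (by rw [htwlen]; omega)]
              rw [htwlen]
              simp only [Nat.add_sub_cancel_left, List.nil_append, List.drop_succ_cons, List.drop_zero]
            rw [dif_pos he]
            rw [htoNat]
            rw [ih (i + m0 + 2) _ (by omega) (by omega)]
            rw [hdropnext, hslice, hdropi, hc]
            rw [pvB_hash_yes m t hmem]
            simp
          · -- no closing '#': the rest contains no '#'
            have hmemn : '#' ∉ t := by
              simp only [ne_eq, not_not] at he
              rw [PySem.Chars.findFrom_natCast cs ['#'] (i+1) (by omega), ← ht] at he
              by_cases hf : PySem.Chars.find t ['#'] = -1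
              · rw [PySem.Chars.find_eq_neg_one_iff, pvSingleton_infix] at hf
                exact hf
              · exfalso
                have h0 := PySem.Chars.neg_one_le_find t ['#']
                rw [if_neg hf] at he
                omega
            rw [dif_neg he]
            rw [ih (i+1) _ (by omega) (by omega)]
            rw [hdropi, hc]
            rw [pvB_hash_no m t hmemn, pvB_no_hash m t hmemn]
            simp
        · simp only [hc, if_false]
          rw [ih (i+1) _ (by omega) (by omega)]
          rw [hdropi, pvB_cons_ne m _ _ hc]
          simp
      · have hieq : i = cs.length := by omega
        simp [hieq, pvB_nil]

-- ===== VERDICT (by name: the statement is the Claim_ definition above) =====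
theorem apply_string_map_py_spec : Claim_equal_apply_string_map_py := by
  intro line string_map _dom
  unfold Spec_apply_string_map_py apply_string_map_py apply_string_map_py_alt
  by_cases hsm : string_map.isEmpty
  · simp [hsm]
  · rw [if_neg hsm, if_neg hsm]
    rw [pvJoin_nil, pvJoin_nil]
    have h := pvGoA_eq (pvToCharsMap string_map) line.toList line.toList.length 0 [] (by omega) (by omega)
    simp only [List.drop_zero, List.flatten_nil, List.nil_append] at h
    exact congrArg String.ofList h
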